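-- pv_equiv track=rewrite | github.com/valentynhol/geekhub | HT_4/7.py | repeat_counter
-- ===== SOURCE A (Python) =====
-- def repeat_counter(original_list, filtered_list, *args):
--     repeat_dict = {}
--
--     for i in filtered_list:
--         repeat = 0
--
--         for k in original_list:
--             if i == k:
--                 repeat += 1
--
--         repeat_dict[i] = repeat
--
--     return repeat_dict
-- ===== SOURCE B (Python) =====
-- def repeat_counter(original_list, filtered_list, *args):
--     repeat_dict = {i: 0 for i in filtered_list}
--     for k in original_list:
--         if k in repeat_dict:
--             repeat_dict[k] += 1
--     return repeat_dict
-- ===== Notes on version B (the rewrite author's own statement) =====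
-- stated objective: faster
-- what changed: Replaces the nested per-filtered-item scan of original_list by pre-initialising a dict of all filtered keys to 0 and making a single pass over original_list incrementing existing keys.
import Mathlib
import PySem

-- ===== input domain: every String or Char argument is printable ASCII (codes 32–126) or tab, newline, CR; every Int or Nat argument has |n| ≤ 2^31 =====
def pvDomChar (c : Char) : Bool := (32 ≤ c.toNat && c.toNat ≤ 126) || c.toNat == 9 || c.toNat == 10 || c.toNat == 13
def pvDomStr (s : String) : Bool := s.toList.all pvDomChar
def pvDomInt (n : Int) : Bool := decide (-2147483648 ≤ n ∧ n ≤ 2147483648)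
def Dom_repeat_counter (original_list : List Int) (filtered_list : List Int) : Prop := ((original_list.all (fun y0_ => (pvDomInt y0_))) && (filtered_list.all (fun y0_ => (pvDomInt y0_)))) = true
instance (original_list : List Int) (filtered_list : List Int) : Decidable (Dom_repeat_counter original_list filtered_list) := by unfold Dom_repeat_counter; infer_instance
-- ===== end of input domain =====

-- B pre-initialises all filtered keys to 0 and counts in one pass over original_list (faster: one scan instead of a scan per filtered item).


-- ===== PORT A =====
def repeat_counter (original_list : List Int) (filtered_list : List Int) : List (Int × Int) :=
  (filtered_list.foldl
    (fun d i =>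
      d.insert i (original_list.foldl (fun rep k => if i == k then rep + 1 else rep) (0 : Int)))
    PySem.Dict.empty).items

-- ===== PORT B =====
def repeat_counter_alt (original_list : List Int) (filtered_list : List Int) : List (Int × Int) :=
  (original_list.foldl
    (fun d k => if d.contains k then d.modify k 0 (· + 1) else d)
    (filtered_list.foldl (fun d i => d.insert i (0 : Int)) PySem.Dict.empty)).items

-- ===== PRECONDITION & SPEC =====
def Spec_repeat_counter (original_list : List Int) (filtered_list : List Int) (out : List (Int × Int)) : Prop := out = repeat_counter_alt original_list filtered_list
instance (original_list : List Int) (filtered_list : List Int) (out : List (Int × Int)) : Decidable (Spec_repeat_counter original_list filtered_list out) := by unfold Spec_repeat_counter; infer_instance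

-- ===== CLAIM (what is proved, stated in full; the proofs are below) =====
def Claim_equal_repeat_counter : Prop := ∀ (original_list : List Int) (filtered_list : List Int), Dom_repeat_counter original_list filtered_list → Spec_repeat_counter original_list filtered_list (repeat_counter original_list filtered_list)

-- ===== LEMMAS AND PROOFS =====

-- A's inner loop counts occurrences of i.
theorem pv_inner_count (i : Int) (l : List Int) (a : Int) :
    l.foldl (fun rep k => if i == k then rep + 1 else rep) a = a + (l.count i : Int) := by
  induction l generalizing a with
  | nil => simp
  | cons k l ih =>
    rw [List.foldl_cons, ih, List.count_cons]
    by_cases h : k = i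
    · subst h; simp; ring
    · have h' : ¬ (i = k) := fun hh => h hh.symm
      simp [h, h']

-- A fold inserting a value that depends only on the key: lookup result.
theorem pv_get_insert_fold (c : Int → Int) (fl : List Int) (d : PySem.Dict Int Int) (j : Int) :
    (fl.foldl (fun d i => d.insert i (c i)) d).get? j
      = if j ∈ fl then some (c j) else d.get? j := by
  induction fl generalizing d with
  | nil => simp
  | cons i fl ih =>
    simp only [List.foldl, ih, PySem.Dict.get?_insert, List.mem_cons]
    by_cases hj : j ∈ fl
    · simp [hj]
    · by_cases hji : j = i <;> simp [hj, hji]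

-- B's guarded counting pass: keys unchanged.
theorem pv_keys_gfold (l : List Int) (d : PySem.Dict Int Int) :
    (l.foldl (fun d k => if d.contains k then d.modify k 0 (· + 1) else d) d).keys = d.keys := by
  induction l generalizing d with
  | nil => rfl
  | cons k l ih =>
    simp only [List.foldl]
    by_cases h : d.contains k = true
    · rw [if_pos h, ih]
      exact PySem.Dict.keys_insert_of_contains d (d.getD k 0 + 1) h
    · rw [if_neg h, ih]

-- B's guarded counting pass: value at an existing key gains the count.
theorem pv_getD_gfold (l : List Int) (d : PySem.Dict Int Int) (j : Int) :
    (l.foldl (fun d k => if d.contains k then d.modify k 0 (· + 1) else d) d).getD j 0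
      = d.getD j 0 + (if d.contains j then (l.count j : Int) else 0) := by
  induction l generalizing d with
  | nil => simp
  | cons k l ih =>
    simp only [List.foldl]
    by_cases hk : d.contains k = true
    · rw [if_pos hk, ih, PySem.Dict.getD_modify, PySem.Dict.contains_modify]
      by_cases hjk : j = k
      · subst hjk
        simp [hk, List.count_cons]
        ring
      · have h' : ¬ (k = j) := fun hh => hjk hh.symm
        simp [hjk, h', List.count_cons]
    · rw [if_neg hk, ih]
      by_cases hjk : j = k
      · subst hjk; simp [hk]
      · have h' : ¬ (k = j) := fun hh => hjk hh.symm
        simp [List.count_cons, h']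

-- ===== VERDICT (by name: the statement is the Claim_ definition above) =====
theorem repeat_counter_spec : Claim_equal_repeat_counter := by
  intro original_list filtered_list _
  unfold Spec_repeat_counter repeat_counter repeat_counter_alt
  set dA := filtered_list.foldl
    (fun d i => d.insert i (original_list.foldl (fun rep k => if i == k then rep + 1 else rep) (0 : Int)))
    PySem.Dict.empty with hdA
  set d0 := filtered_list.foldl (fun d i => d.insert i (0 : Int)) PySem.Dict.empty with hd0
  set dB := original_list.foldl (fun d k => if d.contains k then d.modify k 0 (· + 1) else d) d0 with hdB
  have hkA : dA.keys = PySem.Set.ofList filtered_list := by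
    rw [hdA, PySem.Dict.keys_foldl_insert, PySem.Dict.keys_empty, PySem.Set.update_nil_left]
  have hk0 : d0.keys = PySem.Set.ofList filtered_list := by
    rw [hd0, PySem.Dict.keys_foldl_insert, PySem.Dict.keys_empty, PySem.Set.update_nil_left]
  have hkB : dB.keys = PySem.Set.ofList filtered_list := by
    rw [hdB, pv_keys_gfold, hk0]
  have hndA : dA.keys.Nodup := by rw [hkA]; exact PySem.Set.nodup_ofList _
  have hndB : dB.keys.Nodup := by rw [hkB]; exact PySem.Set.nodup_ofList _
  rw [PySem.Dict.items_eq_map_keys dA hndA 0, PySem.Dict.items_eq_map_keys dB hndB 0, hkA, hkB]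
  apply List.map_congr_left
  intro k hk
  have hkf : k ∈ filtered_list := (PySem.Set.mem_ofList _ _).mp hk
  have hAk : dA.getD k 0 = (original_list.count k : Int) := by
    rw [PySem.Dict.getD_eq_get?_getD, hdA,
      pv_get_insert_fold (fun i => original_list.foldl (fun rep k => if i == k then rep + 1 else rep) (0 : Int)),
      if_pos hkf]
    simp only [Option.getD_some]
    rw [pv_inner_count]
    simp
  have h0k : d0.get? k = some 0 := by
    rw [hd0]
    have := pv_get_insert_fold (fun _ => (0 : Int)) filtered_list PySem.Dict.empty k
    simpa [hkf] using this
  have hc0 : d0.contains k = true := by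
    rw [PySem.Dict.contains_eq_decide_mem_keys, hk0]
    exact decide_eq_true hk
  have hBk : dB.getD k 0 = (original_list.count k : Int) := by
    rw [hdB, pv_getD_gfold, if_pos hc0, PySem.Dict.getD_eq_get?_getD, h0k]
    simp
  rw [hAk, hBk]
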